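-- pv_equiv track=rewrite | github.com/jeffmiscione/Jwent | gwent.py | lookupCardType
-- ===== SOURCE A (Python) =====
-- def lookupCardType(card_name, card_database):
--     first_comma_index = 0
--     second_comma_index = 0
--     third_comma_index = 0
--     commas_found = 0
--     description_indicator_index = 0
--
--     for card in card_database:  # look through card database
--         if card[:len(card_name)] == card_name:  # find matching card in database
--             for i in card:  # look for commas
--                 if i == ',' and commas_found == 0:
--                     second_comma_index += 1
--                     third_comma_index += 1
--                     commas_found += 1
--                 elif i == ',' and commas_found == 1:
--                     third_comma_index += 1
--                     commas_found += 1
--                 elif i ==',' and commas_found == 2: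
--                     break
--                 elif commas_found == 0:
--                     first_comma_index += 1
--                     second_comma_index += 1
--                     third_comma_index += 1
--                 elif commas_found == 1:
--                     second_comma_index += 1
--                     third_comma_index += 1
--                 elif commas_found == 2:
--                     third_comma_index += 1
--             for i in card:  # look for description indicator
--                 if i == '#':
--                     break
--                 else:
--                     description_indicator_index += 1
--
--             return(card[first_comma_index+1:second_comma_index])  # determine text between first 2 commas
-- ===== SOURCE B (Python) =====
-- def lookupCardType(card_name, card_database):
--     for card in card_database:
--         if card.startswith(card_name):
--             parts = card.split(',')
--             return parts[1] if len(parts) > 1 else ''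
--     return None
-- ===== Notes on version B (the rewrite author's own statement) =====
-- stated objective: simpler
-- what changed: Replaces the per-character comma-counting state machine (three slice-index counters, a commas_found state and a dead '#'-scanning loop) with a single split(',') and an index into field 1, keeping the outer prefix scan.
import Mathlib
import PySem

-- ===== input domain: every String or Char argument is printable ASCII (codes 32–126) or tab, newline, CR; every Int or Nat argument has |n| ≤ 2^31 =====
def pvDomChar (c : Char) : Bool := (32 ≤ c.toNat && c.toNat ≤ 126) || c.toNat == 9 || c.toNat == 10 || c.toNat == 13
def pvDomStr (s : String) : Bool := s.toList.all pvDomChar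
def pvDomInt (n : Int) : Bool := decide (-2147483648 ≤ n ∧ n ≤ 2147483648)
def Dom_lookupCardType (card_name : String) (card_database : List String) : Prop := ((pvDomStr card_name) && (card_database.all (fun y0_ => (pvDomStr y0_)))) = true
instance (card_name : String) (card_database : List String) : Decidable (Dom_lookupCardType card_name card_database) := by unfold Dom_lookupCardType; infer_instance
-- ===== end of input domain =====

-- B replaces A's per-character comma-counting state machine (and its dead '#' loop) with
-- split(',') and an index into field 1; objective: simpler. A is total, so no Pre_.

-- ===== PORT A =====
-- inner comma loop of A: state (first_comma_index, second_comma_index, third_comma_index, commas_found)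
def lctLoop1 : List Char → Nat → Nat → Nat → Nat → Nat × Nat × Nat × Nat
  | [], fc, sc, tc, cf => (fc, sc, tc, cf)
  | c :: rest, fc, sc, tc, cf =>
    if c = ',' ∧ cf = 0 then lctLoop1 rest fc (sc + 1) (tc + 1) 1
    else if c = ',' ∧ cf = 1 then lctLoop1 rest fc sc (tc + 1) 2
    else if c = ',' ∧ cf = 2 then (fc, sc, tc, cf)        -- break
    else if cf = 0 then lctLoop1 rest (fc + 1) (sc + 1) (tc + 1) cf
    else if cf = 1 then lctLoop1 rest fc (sc + 1) (tc + 1) cf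
    else if cf = 2 then lctLoop1 rest fc sc (tc + 1) cf
    else lctLoop1 rest fc sc tc cf

-- second inner loop of A: description_indicator_index (its result is never used by A)
def lctLoop2 : List Char → Nat → Nat
  | [], di => di
  | c :: rest, di => if c = '#' then di else lctLoop2 rest (di + 1)

-- outer loop of A, carrying all counters initialised before the loop
def lctOuter (card_name : String) : List String → Nat → Nat → Nat → Nat → Nat → Option String
  | [], _, _, _, _, _ => none
  | card :: rest, fc, sc, tc, cf, di =>
    if PySem.Str.slice card none (some (PySem.Str.len card_name)) = card_name then
      let st := lctLoop1 card.toList fc sc tc cf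
      let _di' := lctLoop2 card.toList di
      some (PySem.Str.slice card (some ((st.1 + 1 : Nat) : Int)) (some ((st.2.1 : Nat) : Int)))
    else lctOuter card_name rest fc sc tc cf di

def lookupCardType (card_name : String) (card_database : List String) : Option String :=
  lctOuter card_name card_database 0 0 0 0 0

-- ===== PORT B =====
def lookupCardType_alt (card_name : String) (card_database : List String) : Option String :=
  match card_database with
  | [] => none
  | card :: rest =>
    if PySem.Str.startswith card card_name then
      let parts := (PySem.Str.split? card ",").getD []
      some (if 1 < parts.length then parts.getD 1 "" else "")
    else lookupCardType_alt card_name rest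

-- ===== PRECONDITION & SPEC =====
def Spec_lookupCardType (card_name : String) (card_database : List String) (out : Option String) : Prop := out = lookupCardType_alt card_name card_database
instance (card_name : String) (card_database : List String) (out : Option String) : Decidable (Spec_lookupCardType card_name card_database out) := by unfold Spec_lookupCardType; infer_instance

-- ===== CLAIM (what is proved, stated in full; the proofs are below) =====
def Claim_equal_lookupCardType : Prop := ∀ (card_name : String) (card_database : List String), Dom_lookupCardType card_name card_database → Spec_lookupCardType card_name card_database (lookupCardType card_name card_database)

-- ===== LEMMAS AND PROOFS =====

-- A's state machine once commas_found = 2: fc and sc are frozen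
theorem lctLoop1_cf2 (l : List Char) : ∀ fc sc tc,
    (lctLoop1 l fc sc tc 2).1 = fc ∧ (lctLoop1 l fc sc tc 2).2.1 = sc := by
  induction l with
  | nil => intro fc sc tc; simp [lctLoop1]
  | cons c rest ih =>
    intro fc sc tc
    by_cases hc : c = ','
    · simp [lctLoop1, hc]
    · simpa [lctLoop1, hc] using ih fc sc (tc + 1)

-- once commas_found = 1: fc frozen, sc gains the length of the comma-free prefix
theorem lctLoop1_cf1 (l : List Char) : ∀ fc sc tc,
    (lctLoop1 l fc sc tc 1).1 = fc ∧
    (lctLoop1 l fc sc tc 1).2.1 = sc + (l.takeWhile (· ≠ ',')).length := by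
  induction l with
  | nil => intro fc sc tc; simp [lctLoop1]
  | cons c rest ih =>
    intro fc sc tc
    by_cases hc : c = ','
    · simpa [lctLoop1, hc, List.takeWhile_cons] using lctLoop1_cf2 rest fc sc (tc + 1)
    · have h := ih fc (sc + 1) (tc + 1)
      simp at h
      simp [lctLoop1, hc]
      omega

-- from the start (commas_found = 0)
theorem lctLoop1_cf0 (l : List Char) : ∀ fc sc tc,
    (lctLoop1 l fc sc tc 0).1 = fc + (l.takeWhile (· ≠ ',')).length ∧
    (lctLoop1 l fc sc tc 0).2.1 =
      (if (',' : Char) ∈ l then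
        sc + (l.takeWhile (· ≠ ',')).length + 1 +
          (((l.dropWhile (· ≠ ',')).drop 1).takeWhile (· ≠ ',')).length
      else sc + l.length) := by
  induction l with
  | nil => intro fc sc tc; simp [lctLoop1]
  | cons c rest ih =>
    intro fc sc tc
    by_cases hc : c = ','
    · subst hc
      have h := lctLoop1_cf1 rest fc (sc + 1) (tc + 1)
      simp at h
      simp [lctLoop1]
      omega
    · have h := ih (fc + 1) (sc + 1) (tc + 1)
      simp at h
      simp [lctLoop1, hc]
      by_cases hm : (',' : Char) ∈ rest <;> simp [hm, Ne.symm hc] at h ⊢ <;> omega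

theorem go_acc : ∀ (fuel : Nat) (l cur : List Char) (acc : List (List Char)),
    PySem.Chars.splitOn.go [','] fuel l cur acc = acc.reverse ++ PySem.Chars.splitOn.go [','] fuel l cur [] := by
  intro fuel
  induction fuel with
  | zero => intro l cur acc; simp [PySem.Chars.splitOn.go]
  | succ f ih =>
    intro l cur acc
    cases l with
    | nil => simp [PySem.Chars.splitOn.go]
    | cons c rest =>
      by_cases hc : c = ','
      · subst hc
        simp only [PySem.Chars.splitOn.go, List.isPrefixOf, BEq.rfl, Bool.true_and, if_true,
          List.length_cons, List.length_nil, List.drop_succ_cons, List.drop_zero]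
        rw [ih rest [] (cur.reverse :: acc), ih rest [] [cur.reverse]]
        simp
      · have hb : ((',' : Char) == c) = false := by simp [Ne.symm hc]
        simp only [PySem.Chars.splitOn.go, List.isPrefixOf, hb, Bool.false_and,
          Bool.false_eq_true, if_false]
        exact ih rest (c :: cur) acc

theorem go_nocomma : ∀ (l : List Char) (fuel : Nat) (cur : List Char) (acc : List (List Char)),
    (',' : Char) ∉ l →
    PySem.Chars.splitOn.go [','] fuel l cur acc = acc.reverse ++ [cur.reverse ++ l] := by
  intro l
  induction l with
  | nil => intro fuel cur acc _; cases fuel <;> simp [PySem.Chars.splitOn.go]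
  | cons c rest ih =>
    intro fuel cur acc h
    have hc : ¬ c = ',' := by rintro rfl; exact h (List.mem_cons_self)
    cases fuel with
    | zero => simp [PySem.Chars.splitOn.go]
    | succ f =>
      have hb : ((',' : Char) == c) = false := by simp [Ne.symm hc]
      simp only [PySem.Chars.splitOn.go, List.isPrefixOf, hb, Bool.false_and,
        Bool.false_eq_true, if_false]
      rw [ih f (c :: cur) acc (fun hx => h (List.mem_cons_of_mem _ hx))]
      simp

theorem go_comma : ∀ (l : List Char), (',' : Char) ∈ l → ∀ (fuel : Nat) (cur : List Char) (acc : List (List Char)),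
    (l.takeWhile (· ≠ ',')).length < fuel →
    PySem.Chars.splitOn.go [','] fuel l cur acc =
      PySem.Chars.splitOn.go [','] (fuel - ((l.takeWhile (· ≠ ',')).length + 1))
        ((l.dropWhile (· ≠ ',')).drop 1) [] ((cur.reverse ++ l.takeWhile (· ≠ ',')) :: acc) := by
  intro l
  induction l with
  | nil => intro h; simp at h
  | cons c rest ih =>
    intro h fuel cur acc hf
    by_cases hc : c = ','
    · subst hc
      cases fuel with
      | zero => simp at hf
      | succ f =>
        simp only [PySem.Chars.splitOn.go, List.isPrefixOf, BEq.rfl, Bool.true_and, if_true,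
          List.length_cons, List.length_nil, List.drop_succ_cons, List.drop_zero]
        simp
    · have hm : (',' : Char) ∈ rest := by cases h with | head => exact absurd rfl hc | tail _ h => exact h
      cases fuel with
      | zero => simp at hf
      | succ f =>
        have hb : ((',' : Char) == c) = false := by simp [Ne.symm hc]
        simp only [PySem.Chars.splitOn.go, List.isPrefixOf, hb, Bool.false_and,
          Bool.false_eq_true, if_false]
        have htw : (c :: rest).takeWhile (· ≠ ',') = c :: rest.takeWhile (· ≠ ',') := by
          simp [hc]
        have hdw : (c :: rest).dropWhile (· ≠ ',') = rest.dropWhile (· ≠ ',') := by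
          simp [hc]
        rw [htw] at hf
        rw [htw, hdw]
        have hf' : (rest.takeWhile (· ≠ ',')).length < f := by
          simp only [List.length_cons] at hf; omega
        have e1 : f + 1 - ((c :: rest.takeWhile (· ≠ ',')).length + 1) =
            f - ((rest.takeWhile (· ≠ ',')).length + 1) := by
          simp only [List.length_cons]; omega
        have e2 : cur.reverse ++ c :: rest.takeWhile (· ≠ ',') =
            (c :: cur).reverse ++ rest.takeWhile (· ≠ ',') := by simp
        rw [e1, e2]
        exact ih hm f (c :: cur) acc hf'

theorem dropWhile_comma (l : List Char) (h : (',' : Char) ∈ l) :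
    l.dropWhile (· ≠ ',') = ',' :: (l.dropWhile (· ≠ ',')).drop 1 := by
  have hmem : (',' : Char) ∈ l.dropWhile (· ≠ ',') := by
    rcases List.mem_append.mp (by rw [List.takeWhile_append_dropWhile]; exact h :
        (',' : Char) ∈ l.takeWhile (· ≠ ',') ++ l.dropWhile (· ≠ ',')) with h1 | h2
    · exact absurd (List.mem_takeWhile_imp h1) (by simp)
    · exact h2
  have hne : l.dropWhile (· ≠ ',') ≠ [] := List.ne_nil_of_mem hmem
  have hh := List.head_dropWhile_not (p := (· ≠ ',')) (l := l) hne
  have : (l.dropWhile (· ≠ ',')).head hne = ',' := by simpa using hh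
  conv_lhs => rw [← List.cons_head_tail hne]
  rw [this, List.drop_one]

theorem splitOn_char (l : List Char) :
    (if 1 < (PySem.Chars.splitOn l [',']).length then (PySem.Chars.splitOn l [',']).getD 1 [] else [])
      = ((l.dropWhile (· ≠ ',')).drop 1).takeWhile (· ≠ ',') := by
  have h1 : PySem.Chars.splitOn l [','] = PySem.Chars.splitOn.go [','] (l.length + 1) l [] [] := rfl
  by_cases hm : (',' : Char) ∈ l
  · have hlen : l.length = (l.takeWhile (· ≠ ',')).length + 1 + ((l.dropWhile (· ≠ ',')).drop 1).length := by
      conv_lhs => rw [← List.takeWhile_append_dropWhile (p := (· ≠ ',')) (l := l)]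
      rw [List.length_append]
      conv_lhs => rw [dropWhile_comma l hm]
      simp; omega
    have hfuel : (l.takeWhile (· ≠ ',')).length < l.length + 1 := by omega
    rw [h1, go_comma l hm _ _ _ hfuel]
    by_cases hm2 : (',' : Char) ∈ (l.dropWhile (· ≠ ',')).drop 1
    · have hlen2 : ((((l.dropWhile (· ≠ ',')).drop 1)).takeWhile (· ≠ ',')).length ≤ ((l.dropWhile (· ≠ ',')).drop 1).length := List.IsPrefix.length_le (List.takeWhile_prefix _)
      have hf2 : ((((l.dropWhile (· ≠ ',')).drop 1)).takeWhile (· ≠ ',')).length <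
          l.length + 1 - ((l.takeWhile (· ≠ ',')).length + 1) := by omega
      rw [go_comma _ hm2 _ _ _ hf2, go_acc]
      simp
    · rw [go_nocomma _ _ _ _ hm2]
      simp
      symm
      rw [List.takeWhile_eq_self_iff]
      intro x hx
      simp only [List.drop_one, ne_eq, decide_not] at hm2
      simp
      rintro rfl
      exact hm2 hx
  · have hd : l.dropWhile (· ≠ ',') = [] := by
      rw [List.dropWhile_eq_nil_iff]
      intro x hx
      simp
      rintro rfl
      exact hm hx
    rw [h1, go_nocomma l _ _ _ hm]
    simp only [ne_eq, decide_not] at hd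
    simp [hd]

-- A's slice value on one matching card equals B's split-based value
theorem card_val (card : String) :
    PySem.Str.slice card (some (((lctLoop1 card.toList 0 0 0 0).1 + 1 : Nat) : Int))
        (some (((lctLoop1 card.toList 0 0 0 0).2.1 : Nat) : Int)) =
      (if 1 < ((PySem.Str.split? card ",").getD []).length then
        ((PySem.Str.split? card ",").getD []).getD 1 "" else "") := by
  have hsplit : PySem.Str.split? card "," = some ((PySem.Chars.splitOn card.toList [',']).map String.ofList) := by
    rw [PySem.Str.split?]
    simp [PySem.Chars.split?]
  rw [hsplit]
  simp only [Option.getD_some, List.length_map]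
  have hgetD : ((PySem.Chars.splitOn card.toList [',']).map String.ofList).getD 1 "" =
      String.ofList ((PySem.Chars.splitOn card.toList [',']).getD 1 []) := by
    simp
  rw [hgetD]
  have hB : (if 1 < (PySem.Chars.splitOn card.toList [',']).length then
      String.ofList ((PySem.Chars.splitOn card.toList [',']).getD 1 []) else ("" : String)) =
      String.ofList (((card.toList.dropWhile (· ≠ ',')).drop 1).takeWhile (· ≠ ',')) := by
    rw [← splitOn_char card.toList]
    split_ifs <;> rfl
  rw [hB]
  -- A side
  rw [PySem.Str.slice, PySem.Chars.slice_eq_listSlice, PySem.List.slice_natCast]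
  congr 1
  obtain ⟨h1, h2⟩ := lctLoop1_cf0 card.toList 0 0 0
  rw [h1, h2]
  by_cases hm : (',' : Char) ∈ card.toList
  · rw [if_pos hm]
    set a := card.toList.takeWhile (· ≠ ',') with ha
    set b := (card.toList.dropWhile (· ≠ ',')).drop 1 with hb
    have hdecomp : card.toList = a ++ ',' :: b := by
      conv_lhs => rw [← List.takeWhile_append_dropWhile (p := (· ≠ ',')) (l := card.toList)]
      rw [dropWhile_comma card.toList hm]
    rw [hdecomp]
    have hdrop : (a ++ ',' :: b).drop (0 + a.length + 1) = b := by
      have : a ++ ',' :: b = (a ++ [',']) ++ b := by simp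
      rw [this]
      have hlen : 0 + a.length + 1 = (a ++ [',']).length := by simp
      rw [hlen, List.drop_left]
    rw [hdrop]
    have htake : b.take ((b.takeWhile (· ≠ ',')).length) = b.takeWhile (· ≠ ',') := by
      exact (List.prefix_iff_eq_take.mp (List.takeWhile_prefix _)).symm
    have harith : 0 + a.length + 1 + (b.takeWhile (· ≠ ',')).length - (0 + a.length + 1) =
        (b.takeWhile (· ≠ ',')).length := by omega
    rw [harith, htake]
  · rw [if_neg hm]
    have hd : card.toList.dropWhile (· ≠ ',') = [] := by
      rw [List.dropWhile_eq_nil_iff]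
      intro x hx
      simp
      rintro rfl
      exact hm hx
    rw [hd]
    have htw : card.toList.takeWhile (· ≠ ',') = card.toList := by
      rw [List.takeWhile_eq_self_iff]
      intro x hx
      simp
      rintro rfl
      exact hm hx
    simp only [ne_eq, decide_not] at htw
    simp [htw, String.length_toList]

-- A's prefix-slice test equals B's startswith test
theorem cond_eq (card card_name : String) :
    (PySem.Str.slice card none (some (PySem.Str.len card_name)) = card_name) ↔
      PySem.Str.startswith card card_name = true := by
  rw [PySem.Str.startswith, PySem.Chars.startswith_iff]
  rw [PySem.Str.slice, PySem.Chars.slice_eq_listSlice, PySem.Str.len,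
    PySem.List.slice_to_natCast]
  constructor
  · intro h
    have : card.toList.take card_name.toList.length = card_name.toList := by
      have h2 := congrArg String.toList h
      simpa using h2
    rw [List.prefix_iff_eq_take]
    exact this.symm
  · intro h
    have h2 := (List.prefix_iff_eq_take.mp h).symm
    rw [h2, String.ofList_toList]

-- ===== VERDICT (by name: the statement is the Claim_ definition above) =====
theorem lct_eq (card_name : String) : ∀ (db : List String),
    lctOuter card_name db 0 0 0 0 0 = lookupCardType_alt card_name db := by
  intro db
  induction db with
  | nil => simp [lctOuter, lookupCardType_alt]
  | cons card rest ih =>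
    by_cases hc : PySem.Str.startswith card card_name = true
    · rw [lctOuter, lookupCardType_alt]
      rw [if_pos ((cond_eq card card_name).mpr hc), if_pos hc]
      exact congrArg some (card_val card)
    · rw [lctOuter, lookupCardType_alt]
      rw [if_neg (fun h => hc ((cond_eq card card_name).mp h)), if_neg hc]
      exact ih

-- ===== VERDICT (by name: the statement is the Claim_ definition above) =====
theorem lookupCardType_spec : Claim_equal_lookupCardType := by
  intro card_name card_database _
  unfold Spec_lookupCardType lookupCardType
  exact lct_eq card_name card_database
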